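-- pv_equiv track=rewrite | github.com/arisosoftware/fsm | src/main/nlp2/tmp_extract_flight_info.py | extract_flight_columns
-- ===== SOURCE A (Python) =====
-- def extract_flight_columns(flight_info):
--     airlines = []
--     flight_numbers = []
--     departure_times = []
--     arrival_times = []
--     layovers = []
--     classes = []
--     durations = []
--
--     for line in flight_info:
--         parts = line.split('\t')
--         if len(parts) >= 9:
--             airlines.append(parts[0])
--             flight_numbers.append(parts[1])
--             departure_times.append(parts[2])
--             arrival_times.append(parts[5])
--             layovers.append(parts[6])
--             classes.append(parts[7])
--             durations.append(parts[8])
--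
--     return airlines, flight_numbers, departure_times, arrival_times, layovers, classes, durations
-- ===== SOURCE B (Python) =====
-- def extract_flight_columns(flight_info):
--     rows = []
--     for line in flight_info:
--         parts = line.split('\t')
--         if len(parts) >= 9:
--             rows.append((parts[0], parts[1], parts[2], parts[5], parts[6], parts[7], parts[8]))
--     if rows:
--         return tuple(list(col) for col in zip(*rows))
--     return [], [], [], [], [], [], []
-- ===== Notes on version B (the rewrite author's own statement) =====
-- stated objective: simpler
-- what changed: Replaces the seven parallel accumulator lists with a single collect-then-transpose pass: build one list of 7-tuples of the selected fields, then transpose it into the seven column lists.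
import Mathlib
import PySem

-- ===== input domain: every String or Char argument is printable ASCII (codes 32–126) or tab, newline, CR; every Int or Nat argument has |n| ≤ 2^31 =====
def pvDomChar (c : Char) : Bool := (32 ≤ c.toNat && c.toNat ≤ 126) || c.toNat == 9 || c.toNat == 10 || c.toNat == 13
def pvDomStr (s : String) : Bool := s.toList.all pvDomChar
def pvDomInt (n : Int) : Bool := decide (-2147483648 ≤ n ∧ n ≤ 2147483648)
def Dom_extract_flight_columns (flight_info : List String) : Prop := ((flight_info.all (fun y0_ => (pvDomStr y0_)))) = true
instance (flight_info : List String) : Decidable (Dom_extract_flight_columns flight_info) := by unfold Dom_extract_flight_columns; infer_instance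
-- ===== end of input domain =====

-- B replaces A's seven parallel accumulator lists with a collect-then-transpose pass (objective: simpler); same return value on every input.


-- ===== PORT A =====
-- loop over the lines, carrying the seven accumulator lists, appending at the end as Python's .append does
def pvLoopA : List String → (List String × List String × List String × List String × List String × List String × List String) → (List String × List String × List String × List String × List String × List String × List String)
  | [], s => s
  | line :: rest, (a, b, c, d, e, f, g) =>
      let parts := ((PySem.Str.split? line "\t").getD [])
      if 9 ≤ parts.length then
        pvLoopA rest (a ++ [parts.getD 0 ""], b ++ [parts.getD 1 ""], c ++ [parts.getD 2 ""],
                      d ++ [parts.getD 5 ""], e ++ [parts.getD 6 ""], f ++ [parts.getD 7 ""],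
                      g ++ [parts.getD 8 ""])
      else
        pvLoopA rest (a, b, c, d, e, f, g)

def extract_flight_columns (flight_info : List String) : List String × List String × List String × List String × List String × List String × List String :=
  pvLoopA flight_info ([], [], [], [], [], [], [])

-- ===== PORT B =====
-- B: collect one list of 7-tuples, then transpose it into seven column lists
def pvRowsB (flight_info : List String) : List (String × String × String × String × String × String × String) :=
  flight_info.filterMap (fun line =>
    let parts := ((PySem.Str.split? line "\t").getD [])
    if 9 ≤ parts.length then
      some (parts.getD 0 "", parts.getD 1 "", parts.getD 2 "", parts.getD 5 "",
            parts.getD 6 "", parts.getD 7 "", parts.getD 8 "")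
    else none)

def extract_flight_columns_alt (flight_info : List String) : List String × List String × List String × List String × List String × List String × List String :=
  let rows := pvRowsB flight_info
  (rows.map (·.1), rows.map (·.2.1), rows.map (·.2.2.1), rows.map (·.2.2.2.1),
   rows.map (·.2.2.2.2.1), rows.map (·.2.2.2.2.2.1), rows.map (·.2.2.2.2.2.2))

-- explicit decidable-equality term for the 7-tuple result type (plain instance search is very slow here)
def pvDEq7 : DecidableEq (List String × List String × List String × List String × List String × List String × List String) :=
  have d : DecidableEq (List String) := inferInstance
  @instDecidableEqProd _ _ d (@instDecidableEqProd _ _ d (@instDecidableEqProd _ _ d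
    (@instDecidableEqProd _ _ d (@instDecidableEqProd _ _ d (@instDecidableEqProd _ _ d d)))))

-- ===== PRECONDITION & SPEC =====
def Spec_extract_flight_columns (flight_info : List String) (out : List String × List String × List String × List String × List String × List String × List String) : Prop := out = extract_flight_columns_alt flight_info
instance (flight_info : List String) (out : List String × List String × List String × List String × List String × List String × List String) : Decidable (Spec_extract_flight_columns flight_info out) := by unfold Spec_extract_flight_columns; exact pvDEq7 out (extract_flight_columns_alt flight_info)

-- ===== CLAIM (what is proved, stated in full; the proofs are below) =====
def Claim_equal_extract_flight_columns : Prop := ∀ (flight_info : List String), Dom_extract_flight_columns flight_info → Spec_extract_flight_columns flight_info (extract_flight_columns flight_info)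

-- ===== LEMMAS AND PROOFS =====

-- loop invariant: the loop appends exactly the transposed rows behind the accumulators
theorem pvLoopA_eq (ls : List String)
    (a b c d e f g : List String) :
    pvLoopA ls (a, b, c, d, e, f, g) =
      (a ++ (pvRowsB ls).map (·.1), b ++ (pvRowsB ls).map (·.2.1),
       c ++ (pvRowsB ls).map (·.2.2.1), d ++ (pvRowsB ls).map (·.2.2.2.1),
       e ++ (pvRowsB ls).map (·.2.2.2.2.1), f ++ (pvRowsB ls).map (·.2.2.2.2.2.1),
       g ++ (pvRowsB ls).map (·.2.2.2.2.2.2)) := by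
  induction ls generalizing a b c d e f g with
  | nil => simp [pvLoopA, pvRowsB]
  | cons line rest ih =>
      simp only [pvLoopA, pvRowsB, List.filterMap_cons]
      split_ifs with h
      · simp [ih, pvRowsB]
      · simp [ih, pvRowsB]

-- ===== VERDICT (by name: the statement is the Claim_ definition above) =====
theorem extract_flight_columns_spec : Claim_equal_extract_flight_columns := by
  intro fi _
  show extract_flight_columns fi = extract_flight_columns_alt fi
  simp [extract_flight_columns, extract_flight_columns_alt, pvLoopA_eq]
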